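-- pv_equiv track=rewrite | github.com/alstja98/Algorithm | 24_03_27(2).py | solution
-- ===== SOURCE A (Python) =====
-- def generate_patterns(answers_length):
--     pattern1 = [1,2,3,4,5]
--     pattern2 = [2,1,2,3,2,4,2,5]
--     pattern3 = [3,3,1,1,2,2,4,4,5,5]
--
--     pattern1_extended = pattern1 * (answers_length//len(pattern1)) + pattern1[:(answers_length%len(pattern1))]
--     pattern2_extended = pattern2 * (answers_length//len(pattern2)) + pattern2[:(answers_length%len(pattern2))]
--     pattern3_extended = pattern3 * (answers_length//len(pattern3)) + pattern3[:(answers_length%len(pattern3))]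
--
--     return pattern1_extended, pattern2_extended, pattern3_extended
--
-- def solution(answers):
--     answer = []
--     player1, player2, player3 = generate_patterns(len(answers))
--
--     scores = [0,0,0]
--
--     for index, sol in enumerate(answers):
--         if player1[index] == sol: scores[0] += 1
--         if player2[index] == sol: scores[1] += 1
--         if player3[index] == sol: scores[2] += 1
--
--     highest_score = max(scores)
--
--     answer = [i+1 for i, score in enumerate(scores) if highest_score == score] # point. 최고점수를 비교하기 위해서 scores를 두어서 리스트 내포로 채우는 법
--
--     return answer
-- ===== SOURCE B (Python) =====
-- def solution(answers):
--     # Frequency table of (position phase mod 40, answer value); 40 = lcm(5, 8, 10),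
--     # so a pattern's pick at phase r is p[r % len(p)] for every occurrence of that phase.
--     tally = {}
--     for i, a in enumerate(answers):
--         key = (i % 40, a)
--         tally[key] = tally.get(key, 0) + 1
--     patterns = [[1, 2, 3, 4, 5], [2, 1, 2, 3, 2, 4, 2, 5], [3, 3, 1, 1, 2, 2, 4, 4, 5, 5]]
--     scores = [sum(tally.get((r, p[r % len(p)]), 0) for r in range(40)) for p in patterns]
--     best = max(scores)
--     return [k + 1 for k, s in enumerate(scores) if s == best]
-- ===== Notes on version B (the rewrite author's own statement) =====
-- stated objective: alternative
-- what changed: Instead of comparing every answer against each pattern, B builds one frequency dictionary of (position mod 40, answer) pairs (40 = lcm of the pattern lengths) in a single pass and then scores each pattern with 40 dictionary lookups, replacing A's pre-tiled pattern lists and per-element three-way comparison loop.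
import Mathlib
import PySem

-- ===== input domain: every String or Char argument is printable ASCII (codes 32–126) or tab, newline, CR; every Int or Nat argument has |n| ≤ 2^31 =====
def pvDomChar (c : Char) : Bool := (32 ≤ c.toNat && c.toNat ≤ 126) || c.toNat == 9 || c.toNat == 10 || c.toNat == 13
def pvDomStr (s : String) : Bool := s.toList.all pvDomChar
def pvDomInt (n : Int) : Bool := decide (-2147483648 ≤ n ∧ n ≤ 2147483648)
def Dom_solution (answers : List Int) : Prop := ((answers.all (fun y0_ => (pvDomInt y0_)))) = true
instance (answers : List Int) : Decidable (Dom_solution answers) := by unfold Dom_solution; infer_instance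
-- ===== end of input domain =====

-- B replaces A's pre-tiled pattern lists and per-element three-way comparison loop by one
-- frequency dictionary of (position mod 40, answer) pairs, scoring each pattern with 40
-- dictionary lookups (objective: alternative; same O(n) cost).

-- ===== PORT A =====
-- pattern * k → flatten (replicate k pattern); pattern[:m] → take; len//, len% are on Nat (nonneg), matching Python's //,%.
def generatePatterns (answersLength : Nat) : List Int × List Int × List Int :=
  let pattern1 : List Int := [1,2,3,4,5]
  let pattern2 : List Int := [2,1,2,3,2,4,2,5]
  let pattern3 : List Int := [3,3,1,1,2,2,4,4,5,5]
  ((List.replicate (answersLength / pattern1.length) pattern1).flatten ++ pattern1.take (answersLength % pattern1.length),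
   (List.replicate (answersLength / pattern2.length) pattern2).flatten ++ pattern2.take (answersLength % pattern2.length),
   (List.replicate (answersLength / pattern3.length) pattern3).flatten ++ pattern3.take (answersLength % pattern3.length))

def solution (answers : List Int) : List Int :=
  let ps := generatePatterns answers.length
  let player1 := ps.1
  let player2 := ps.2.1
  let player3 := ps.2.2
  -- player_k[index]: index < len(answers) = len(player_k), so always in range; pyGetD's default is never used
  let scores : Int × Int × Int :=
    (PySem.List.enumerate answers 0).foldl
      (fun s isol =>
        (if PySem.List.pyGetD player1 isol.1 0 = isol.2 then s.1 + 1 else s.1,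
         if PySem.List.pyGetD player2 isol.1 0 = isol.2 then s.2.1 + 1 else s.2.1,
         if PySem.List.pyGetD player3 isol.1 0 = isol.2 then s.2.2 + 1 else s.2.2))
      (0, 0, 0)
  -- max(scores) on the non-empty 3-element list: max? is always some here
  let highestScore := (PySem.List.max? [scores.1, scores.2.1, scores.2.2] (fun x => x)).getD 0
  (PySem.List.enumerate [scores.1, scores.2.1, scores.2.2] 0).filterMap
    (fun iscore => if highestScore = iscore.2 then some (iscore.1 + 1) else none)

-- ===== PORT B =====
-- tally = {}; tally[key] = tally.get(key, 0) + 1 over key = (i % 40, a) for i, a in enumerate(answers)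
def solution_alt (answers : List Int) : List Int :=
  let tally : PySem.Dict (Int × Int) Int :=
    (PySem.List.enumerate answers 0).foldl
      (fun d ia => d.insert (PySem.Int.mod ia.1 40, ia.2)
                     (d.getD (PySem.Int.mod ia.1 40, ia.2) 0 + 1))
      PySem.Dict.empty
  let patterns : List (List Int) := [[1,2,3,4,5],[2,1,2,3,2,4,2,5],[3,3,1,1,2,2,4,4,5,5]]
  -- sum(tally.get((r, p[r % len(p)]), 0) for r in range(40)); p[r % len(p)] always in range
  let scores := patterns.map (fun p =>
    ((PySem.List.pyRange 0 40).map
      (fun r => tally.getD (r, PySem.List.pyGetD p (PySem.Int.mod r (p.length : Int)) 0) 0)).sum)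
  let best := (PySem.List.max? scores (fun x => x)).getD 0
  (PySem.List.enumerate scores 0).filterMap
    (fun ks => if ks.2 = best then some (ks.1 + 1) else none)

-- ===== PRECONDITION & SPEC =====
def Spec_solution (answers : List Int) (out : List Int) : Prop := out = solution_alt answers
instance (answers : List Int) (out : List Int) : Decidable (Spec_solution answers out) := by unfold Spec_solution; infer_instance

-- ===== CLAIM (what is proved, stated in full; the proofs are below) =====
def Claim_equal_solution : Prop := ∀ (answers : List Int), Dom_solution answers → Spec_solution answers (solution answers)

-- ===== LEMMAS AND PROOFS =====

-- the list of keys B tallies: (i mod 40, answers[i])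
def pvKeys (answers : List Int) : List (Int × Int) :=
  (PySem.List.enumerate answers 0).map (fun ia => (PySem.Int.mod ia.1 40, ia.2))

-- indexing into flatten (replicate k p) is cyclic indexing into p
lemma flatten_replicate_getD (p : List Int) (k i : Nat) (hi : i < k * p.length) :
    ((List.replicate k p).flatten).getD i 0 = p.getD (i % p.length) 0 := by
  induction k generalizing i with
  | zero => simp at hi
  | succ k ih =>
    rw [Nat.succ_mul] at hi
    rw [List.replicate_succ, List.flatten_cons]
    by_cases h : i < p.length
    · rw [List.getD_append _ _ _ _ h, Nat.mod_eq_of_lt h]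
    · rw [Nat.not_lt] at h
      rw [List.getD_append_right _ _ _ _ h, ih (i - p.length) (by omega),
          Nat.mod_eq_sub_mod h]

-- indexing into A's extended pattern of length n, at i < n, is cyclic indexing into p
lemma extended_getD (p : List Int) (hp : 0 < p.length) (n i : Nat) (hi : i < n) :
    (((List.replicate (n / p.length) p).flatten ++ p.take (n % p.length)).getD i 0)
      = p.getD (i % p.length) 0 := by
  have hflen : ((List.replicate (n / p.length) p).flatten).length = n / p.length * p.length := by
    simp [Nat.mul_comm]
  have hmod := Nat.div_add_mod' n p.length
  have hmlt := Nat.mod_lt n hp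
  by_cases h : i < n / p.length * p.length
  · rw [List.getD_append _ _ _ _ (lt_of_lt_of_eq h hflen.symm), flatten_replicate_getD p _ i h]
  · rw [Nat.not_lt] at h
    rw [List.getD_append_right _ _ _ _ (le_of_eq_of_le hflen h), hflen]
    have hlt : i - n / p.length * p.length < n % p.length := by omega
    have him : i % p.length = i - n / p.length * p.length := by
      conv_lhs => rw [show i = (i - n / p.length * p.length) + (n / p.length) * p.length from by omega]
      rw [Nat.add_mul_mod_self_right, Nat.mod_eq_of_lt (by omega)]
    rw [him, List.getD_eq_getElem _ _ (by rw [List.length_take]; omega),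
        List.getD_eq_getElem _ _ (by omega)]
    exact List.getElem_take

-- indices produced by enumerate are bounded
lemma mem_enumerate_bound {α : Type} (l : List α) (s : Int) (ia : Int × α)
    (h : ia ∈ PySem.List.enumerate l s) : s ≤ ia.1 ∧ ia.1 < s + l.length := by
  induction l generalizing s with
  | nil => simp [PySem.List.enumerate] at h
  | cons x xs ih =>
    rw [PySem.List.enumerate_cons] at h
    rcases List.mem_cons.mp h with h | h
    · subst h; simp
    · have := ih (s + 1) h
      simp only [List.length_cons]
      push_cast
      omega

-- triple-state fold splits into three independent folds
lemma foldl_triple {β : Type} (f1 f2 f3 : Int → β → Int) (l : List β) (a b c : Int) :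
    List.foldl (fun s e => (f1 s.1 e, f2 s.2.1 e, f3 s.2.2 e)) (a, b, c) l
      = (List.foldl f1 a l, List.foldl f2 b l, List.foldl f3 c l) := by
  refine (PySem.List.foldl_prod_mk f1 (fun (bc : Int × Int) e => (f2 bc.1 e, f3 bc.2 e)) l a (b, c)).trans ?_
  rw [PySem.List.foldl_prod_mk]

-- every first component of pvKeys lies in range(40)
lemma keys_mem (answers : List Int) :
    ∀ q ∈ pvKeys answers, q.1 ∈ PySem.List.pyRange 0 40 := by
  intro q hq
  unfold pvKeys at hq
  rcases List.mem_map.mp hq with ⟨ia, hia, rfl⟩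
  have hb := mem_enumerate_bound answers 0 ia hia
  obtain ⟨i, hi⟩ : ∃ i : Nat, ia.1 = (i : Int) := ⟨ia.1.toNat, by omega⟩
  rw [PySem.List.mem_pyRange_one]
  show 0 ≤ PySem.Int.mod ia.1 40 ∧ PySem.Int.mod ia.1 40 < 40
  rw [hi, show (40 : Int) = ((40 : Nat) : Int) from rfl, PySem.Int.mod_natCast]
  have : i % 40 < 40 := Nat.mod_lt _ (by omega)
  constructor <;> omega

lemma pyRange40_nodup : (PySem.List.pyRange 0 40).Nodup := by decide

-- sum over R of the indicator "q = (r, g r)" collapses to "q.2 = g q.1" when q.1 ∈ R, R nodup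
lemma sum_ind (R : List Int) (hR : R.Nodup) (g : Int → Int) (q : Int × Int) (hq : q.1 ∈ R) :
    (R.map (fun r => if q == (r, g r) then (1 : Int) else 0)).sum
      = if q.2 == g q.1 then 1 else 0 := by
  by_cases h : q.2 = g q.1
  · have hpt : ∀ r ∈ R, (if q == (r, g r) then (1 : Int) else 0)
        = (if r == q.1 then (1 : Int) else 0) := by
      intro r _
      by_cases hr : r = q.1
      · subst hr; simp [Prod.ext_iff, h]
      · rw [if_neg (by simp [Prod.ext_iff]; intro h1; exact absurd h1.symm hr),
            if_neg (by simp [hr])]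
    rw [List.map_congr_left hpt, PySem.List.sum_map_ite_one_zero]
    have hc : R.countP (fun r => r == q.1) = R.count q.1 := rfl
    rw [hc, List.count_eq_one_of_mem hR hq]
    simp [h]
  · have hpt : ∀ r ∈ R, (if q == (r, g r) then (1 : Int) else 0) = 0 := by
      intro r _
      rw [if_neg (by simp [Prod.ext_iff]; intro h1; rw [← h1]; exact h)]
    rw [List.map_congr_left hpt]
    simp [h]

-- sum over R of per-key counts = one countP over the key list
lemma sum_count_eq_countP (R : List Int) (hR : R.Nodup) (g : Int → Int) (xs : List (Int × Int))
    (hx : ∀ q ∈ xs, q.1 ∈ R) :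
    (R.map (fun r => (xs.count (r, g r) : Int))).sum
      = (xs.countP (fun q => q.2 == g q.1) : Int) := by
  induction xs with
  | nil => simp
  | cons q xs ih =>
    have hq : q.1 ∈ R := hx q List.mem_cons_self
    have hxs : ∀ t ∈ xs, t.1 ∈ R := fun t ht => hx t (List.mem_cons_of_mem _ ht)
    have hmap : ∀ r : Int, ((List.count (r, g r) (q :: xs) : Nat) : Int)
        = (List.count (r, g r) xs : Int) + (if q == (r, g r) then (1 : Int) else 0) := by
      intro r
      rw [List.count_cons]
      split_ifs with hcond <;> push_cast <;> ring
    simp only [hmap]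
    rw [PySem.List.sum_map_add_int, ih hxs, sum_ind R hR g q hq, List.countP_cons]
    split_ifs with hcond <;> push_cast <;> ring

-- per pattern: A's match-counting fold over the extended list = B's 40 lookups into the tally
lemma score_eq (p : List Int) (hp : 0 < p.length) (hd : p.length ∣ 40) (answers : List Int) :
    List.foldl (fun acc (isol : Int × Int) =>
        if PySem.List.pyGetD ((List.replicate (answers.length / p.length) p).flatten
             ++ p.take (answers.length % p.length)) isol.1 0 = isol.2
        then acc + 1 else acc) 0 (PySem.List.enumerate answers 0)
    = ((PySem.List.pyRange 0 40).map
        (fun r => ((pvKeys answers).count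
            (r, PySem.List.pyGetD p (PySem.Int.mod r (p.length : Int)) 0) : Int))).sum := by
  rw [PySem.List.foldl_ite_add_one, zero_add,
      sum_count_eq_countP (PySem.List.pyRange 0 40) pyRange40_nodup
        (fun r => PySem.List.pyGetD p (PySem.Int.mod r (p.length : Int)) 0)
        (pvKeys answers) (keys_mem answers)]
  unfold pvKeys
  rw [List.countP_map]
  norm_cast
  apply List.countP_congr
  intro ia hia
  have hb := mem_enumerate_bound answers 0 ia hia
  obtain ⟨i, hi⟩ : ∃ i : Nat, ia.1 = (i : Int) := ⟨ia.1.toNat, by omega⟩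
  have hin : i < answers.length := by omega
  simp only [Function.comp]
  rw [hi, show (40 : Int) = ((40 : Nat) : Int) from rfl, PySem.Int.mod_natCast,
      PySem.Int.mod_natCast, PySem.List.pyGetD_natCast, PySem.List.pyGetD_natCast,
      extended_getD p hp answers.length i hin, Nat.mod_mod_of_dvd i hd]
  simp only [decide_eq_true_eq, beq_iff_eq]
  exact eq_comm

-- the final comprehension's condition order (highest == score vs score == best) does not matter
lemma filterMap_eq_comm (l : List Int) (h : Int) :
    (PySem.List.enumerate l 0).filterMap (fun ks => if h = ks.2 then some (ks.1 + 1) else none)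
      = (PySem.List.enumerate l 0).filterMap (fun ks => if ks.2 = h then some (ks.1 + 1) else none) := by
  congr 1
  funext ks
  by_cases hh : h = ks.2
  · simp [hh]
  · simp [hh, Ne.symm hh]

-- B's getD into the tally is a count over the key list
lemma tally_getD (answers : List Int) (v : Int × Int) :
    ((PySem.List.enumerate answers 0).foldl
      (fun d ia => d.insert (PySem.Int.mod ia.1 40, ia.2)
                     (d.getD (PySem.Int.mod ia.1 40, ia.2) 0 + 1))
      PySem.Dict.empty).getD v 0 = ((pvKeys answers).count v : Int) := by
  unfold pvKeys
  rw [← List.foldl_map (f := fun ia : Int × Int => (PySem.Int.mod ia.1 40, ia.2))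
        (g := fun (d : PySem.Dict (Int × Int) Int) k => d.insert k (d.getD k 0 + 1)),
      PySem.Dict.getD_foldl_insert_add_one, PySem.Dict.getD_empty]
  ring

-- shorthand for B's per-pattern sum of tally counts
def pvBScore (answers : List Int) (p : List Int) : Int :=
  ((PySem.List.pyRange 0 40).map
    (fun r => ((pvKeys answers).count
        (r, PySem.List.pyGetD p (PySem.Int.mod r (p.length : Int)) 0) : Int))).sum

-- A's scores triple equals B's three tally sums
lemma scores_eq (answers : List Int) :
    List.foldl (fun (s : Int × Int × Int) (isol : Int × Int) =>
        (if PySem.List.pyGetD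
              ((List.replicate (answers.length / ([1, 2, 3, 4, 5] : List Int).length) ([1, 2, 3, 4, 5] : List Int)).flatten ++
                List.take (answers.length % ([1, 2, 3, 4, 5] : List Int).length) ([1, 2, 3, 4, 5] : List Int)) isol.1 0 = isol.2
          then s.1 + 1 else s.1,
         if PySem.List.pyGetD
              ((List.replicate (answers.length / ([2, 1, 2, 3, 2, 4, 2, 5] : List Int).length) ([2, 1, 2, 3, 2, 4, 2, 5] : List Int)).flatten ++
                List.take (answers.length % ([2, 1, 2, 3, 2, 4, 2, 5] : List Int).length) ([2, 1, 2, 3, 2, 4, 2, 5] : List Int)) isol.1 0 = isol.2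
          then s.2.1 + 1 else s.2.1,
         if PySem.List.pyGetD
              ((List.replicate (answers.length / ([3, 3, 1, 1, 2, 2, 4, 4, 5, 5] : List Int).length) ([3, 3, 1, 1, 2, 2, 4, 4, 5, 5] : List Int)).flatten ++
                List.take (answers.length % ([3, 3, 1, 1, 2, 2, 4, 4, 5, 5] : List Int).length) ([3, 3, 1, 1, 2, 2, 4, 4, 5, 5] : List Int)) isol.1 0 = isol.2
          then s.2.2 + 1 else s.2.2))
      (0, 0, 0) (PySem.List.enumerate answers 0)
      = (pvBScore answers ([1, 2, 3, 4, 5] : List Int),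
         pvBScore answers ([2, 1, 2, 3, 2, 4, 2, 5] : List Int),
         pvBScore answers ([3, 3, 1, 1, 2, 2, 4, 4, 5, 5] : List Int)) := by
  refine (foldl_triple
      (fun acc (isol : Int × Int) =>
        if PySem.List.pyGetD
            ((List.replicate (answers.length / ([1, 2, 3, 4, 5] : List Int).length) ([1, 2, 3, 4, 5] : List Int)).flatten ++
              List.take (answers.length % ([1, 2, 3, 4, 5] : List Int).length) ([1, 2, 3, 4, 5] : List Int)) isol.1 0 = isol.2
        then acc + 1 else acc)
      (fun acc (isol : Int × Int) =>
        if PySem.List.pyGetD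
            ((List.replicate (answers.length / ([2, 1, 2, 3, 2, 4, 2, 5] : List Int).length) ([2, 1, 2, 3, 2, 4, 2, 5] : List Int)).flatten ++
              List.take (answers.length % ([2, 1, 2, 3, 2, 4, 2, 5] : List Int).length) ([2, 1, 2, 3, 2, 4, 2, 5] : List Int)) isol.1 0 = isol.2
        then acc + 1 else acc)
      (fun acc (isol : Int × Int) =>
        if PySem.List.pyGetD
            ((List.replicate (answers.length / ([3, 3, 1, 1, 2, 2, 4, 4, 5, 5] : List Int).length) ([3, 3, 1, 1, 2, 2, 4, 4, 5, 5] : List Int)).flatten ++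
              List.take (answers.length % ([3, 3, 1, 1, 2, 2, 4, 4, 5, 5] : List Int).length) ([3, 3, 1, 1, 2, 2, 4, 4, 5, 5] : List Int)) isol.1 0 = isol.2
        then acc + 1 else acc)
      (PySem.List.enumerate answers 0) 0 0 0).trans ?_
  unfold pvBScore
  rw [score_eq ([1, 2, 3, 4, 5] : List Int) (by decide) (by decide) answers,
      score_eq ([2, 1, 2, 3, 2, 4, 2, 5] : List Int) (by decide) (by decide) answers,
      score_eq ([3, 3, 1, 1, 2, 2, 4, 4, 5, 5] : List Int) (by decide) (by decide) answers]

-- ===== VERDICT (by name: the statement is the Claim_ definition above) =====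
theorem solution_spec : Claim_equal_solution := by
  intro answers _
  unfold Spec_solution solution solution_alt generatePatterns
  simp only [List.map_cons, List.map_nil]
  simp only [tally_getD answers]
  rw [scores_eq answers]
  exact filterMap_eq_comm _ _
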